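-- pv_equiv track=rewrite | github.com/rajitbanerjee/leetcode | src/rotatedDigits/dig.py | rotatedDigits
-- ===== SOURCE A (Python) =====
-- def rotatedDigits(N: int) -> int:
--     count = 0
--
--     def good(i: str) -> bool:
--         if "3" in i or "4" in i or "7" in i:
--             return False
--         else:
--             return "2" in i or "5" in i or \
--                 "6" in i or "9" in i
--
--     for i in range(1, N + 1):
--         if good(str(i)):
--             count += 1
--
--     return count
-- ===== SOURCE B (Python) =====
-- def rotatedDigits(N: int) -> int:
--     # Digit-DP: count numbers in [1, n] whose digits all lie in S, in O(log^2 n),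
--     # then good-count = countLE(N, S7) - countLE(N, S3).
--     S7 = [0, 1, 2, 5, 6, 8, 9]
--     S3 = [0, 1, 8]
--
--     def allIn(x: int, S) -> bool:
--         while x > 0:
--             if x % 10 not in S:
--                 return False
--             x //= 10
--         return True
--
--     def countLE(n: int, S) -> int:
--         if n <= 0:
--             return 0
--         q, r = n // 10, n % 10
--         low = sum(1 for d in S if d <= r)
--         if q == 0:
--             return sum(1 for d in S if 1 <= d <= r)
--         return (countLE(q - 1, S) + 1) * len(S) - 1 + (low if allIn(q, S) else 0)
--
--     return countLE(N, S7) - countLE(N, S3)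
-- ===== Notes on version B (the rewrite author's own statement) =====
-- stated objective: faster
-- what changed: Replaces A's scan of every number from one to N (stringifying each and testing its characters) by a digit-DP recursion on the decimal prefix N//ten: it counts numbers whose digits all stay valid under rotation and subtracts those whose digits all map to themselves.
import Mathlib
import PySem

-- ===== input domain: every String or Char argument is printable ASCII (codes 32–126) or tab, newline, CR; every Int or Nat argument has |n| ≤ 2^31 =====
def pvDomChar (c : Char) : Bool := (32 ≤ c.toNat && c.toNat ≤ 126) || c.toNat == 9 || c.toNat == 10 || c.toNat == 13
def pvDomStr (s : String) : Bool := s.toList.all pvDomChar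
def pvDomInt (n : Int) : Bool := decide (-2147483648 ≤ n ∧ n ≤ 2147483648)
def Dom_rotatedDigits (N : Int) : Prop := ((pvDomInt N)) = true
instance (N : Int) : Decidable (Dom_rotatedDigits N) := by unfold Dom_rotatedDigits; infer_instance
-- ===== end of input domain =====

-- B replaces A's per-number scan by a digit-DP recursion on the decimal prefix of N (count numbers
-- whose digits are all rotatable minus those whose digits all map to themselves); objective: faster.

-- ===== PORT A =====
def goodA (i : String) : Bool :=
  if PySem.Str.isIn "3" i || PySem.Str.isIn "4" i || PySem.Str.isIn "7" i then
    false
  else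
    PySem.Str.isIn "2" i || PySem.Str.isIn "5" i || PySem.Str.isIn "6" i || PySem.Str.isIn "9" i

def rotatedDigits (N : Int) : Int :=
  (PySem.List.pyRange 1 (N + 1) 1).foldl
    (fun count i => if goodA (PySem.Int.toStr i) then count + 1 else count) 0

-- ===== PORT B =====
def pvS7 : List Int := [0, 1, 2, 5, 6, 8, 9]
def pvS3 : List Int := [0, 1, 8]

def allInB (x : Int) (S : List Int) : Bool :=
  if x ≤ 0 then true
  else if PySem.Int.mod x 10 ∈ S then allInB (PySem.Int.floordiv x 10) S
  else false
termination_by x.toNat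
decreasing_by
  rw [PySem.Int.floordiv_eq_ediv_of_pos (by norm_num)]; omega

def countLEB (n : Int) (S : List Int) : Int :=
  if n ≤ 0 then 0
  else
    let q := PySem.Int.floordiv n 10
    let r := PySem.Int.mod n 10
    let low : Int := (S.countP (fun d => decide (d ≤ r)) : Nat)
    if q = 0 then ((S.countP (fun d => decide (1 ≤ d ∧ d ≤ r)) : Nat) : Int)
    else (countLEB (q - 1) S + 1) * (S.length : Int) - 1 + (if allInB q S then low else 0)
termination_by n.toNat
decreasing_by
  rw [PySem.Int.floordiv_eq_ediv_of_pos (by norm_num)]; omega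

def rotatedDigits_alt (N : Int) : Int := countLEB N pvS7 - countLEB N pvS3

-- ===== PRECONDITION & SPEC =====
def Spec_rotatedDigits (N : Int) (out : Int) : Prop := out = rotatedDigits_alt N
instance (N : Int) (out : Int) : Decidable (Spec_rotatedDigits N out) := by unfold Spec_rotatedDigits; infer_instance

-- ===== CLAIM (what is proved, stated in full; the proofs are below) =====
def Claim_equal_rotatedDigits : Prop := ∀ (N : Int), Dom_rotatedDigits N → Spec_rotatedDigits N (rotatedDigits N)

-- ===== LEMMAS AND PROOFS =====

-- `Nat.toDigitsCore` with enough fuel produces the base-10 digits, most significant first.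
lemma pv_toDigitsCore_eq (fuel : Nat) : ∀ (n : Nat) (ds : List Char), 0 < n → n ≤ fuel →
    Nat.toDigitsCore 10 fuel n ds = ((Nat.digits 10 n).map Nat.digitChar).reverse ++ ds := by
  induction fuel with
  | zero => intro n ds h1 h2; omega
  | succ f ih =>
    intro n ds h1 h2
    rw [Nat.toDigitsCore]
    by_cases hq : n / 10 = 0
    · simp only [hq]
      rw [Nat.digits_def' (by norm_num) h1]
      have h10 : Nat.digits 10 (n / 10) = [] := by rw [hq]; simp
      simp [h10]
    · simp only [if_neg hq]
      rw [ih (n / 10) _ (by omega) (by omega)]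
      rw [Nat.digits_def' (by norm_num) h1]
      simp

lemma pv_toDigits_eq (n : Nat) (h : 0 < n) :
    Nat.toDigits 10 n = ((Nat.digits 10 n).map Nat.digitChar).reverse := by
  rw [Nat.toDigits, pv_toDigitsCore_eq (n+1) n [] h (by omega)]
  simp

-- For a decimal digit character, membership in str(n) is membership in the digit list of n.
lemma pv_mem_toDigits {c : Char} {d0 : Nat}
    (hc : ∀ d, d < 10 → (Nat.digitChar d = c ↔ d = d0)) {n : Nat} (h : 0 < n) :
    c ∈ Nat.toDigits 10 n ↔ d0 ∈ Nat.digits 10 n := by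
  rw [pv_toDigits_eq n h]
  simp only [List.mem_reverse, List.mem_map]
  constructor
  · rintro ⟨d, hd, hdc⟩
    have hlt : d < 10 := Nat.digits_lt_base (by norm_num) hd
    rwa [(hc d hlt).mp hdc] at hd
  · intro hd
    exact ⟨d0, hd, (hc d0 (Nat.digits_lt_base (by norm_num) hd)).mpr rfl⟩

lemma pv_isIn_singleton (c : Char) (s : List Char) :
    PySem.Chars.isIn [c] s = true ↔ c ∈ s := by
  rw [PySem.Chars.isIn_iff_infix]
  constructor
  · intro hinf; exact List.singleton_sublist.mp hinf.sublist
  · intro hmem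
    obtain ⟨l1, l2, rfl⟩ := List.mem_iff_append.mp hmem
    exact ⟨l1, l2, by simp⟩

lemma pv_allInB_iff (S : List Int) : ∀ (n : Nat),
    allInB (n : Int) S = true ↔ ∀ d ∈ Nat.digits 10 n, (d : Int) ∈ S := by
  intro n
  induction n using Nat.strong_induction_on with
  | _ n ih =>
    rw [allInB]
    by_cases h0 : n = 0
    · subst h0; simp
    · have hpos : ¬ ((n : Int) ≤ 0) := by omega
      rw [if_neg hpos]
      rw [PySem.Int.mod_eq_emod_of_pos (by norm_num), PySem.Int.floordiv_eq_ediv_of_pos (by norm_num)]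
      have hm : (n : Int) % 10 = ((n % 10 : Nat) : Int) := by omega
      have hdvd : (n : Int) / 10 = ((n / 10 : Nat) : Int) := by omega
      rw [hm, hdvd, Nat.digits_def' (b := 10) (by norm_num) (by omega)]
      by_cases hmem : ((n % 10 : Nat) : Int) ∈ S
      · rw [if_pos hmem, ih (n / 10) (by omega)]
        simp only [List.mem_cons]
        constructor
        · rintro hall d (rfl | hd)
          · exact hmem
          · exact hall d hd
        · exact fun hall d hd => hall d (Or.inr hd)
      · rw [if_neg hmem]
        simp only [Bool.false_eq_true, false_iff, List.mem_cons]
        intro hall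
        exact hmem (hall _ (Or.inl rfl))

-- pointwise: A's good-test equals the difference of the two all-digits indicators
lemma pv_good_eq (n : Nat) (h : 0 < n) :
    (if goodA (PySem.Int.toStr (n : Int)) then (1 : Int) else 0) =
      (if allInB (n : Int) pvS7 then (1 : Int) else 0) -
      (if allInB (n : Int) pvS3 then (1 : Int) else 0) := by
  have hts : (PySem.Int.toStr (n : Int)).toList = Nat.toDigits 10 n := by
    rw [PySem.Int.toList_toStr, PySem.Int.toChars, if_neg (by omega)]
    simp
  have key : ∀ (cs : String) (c : Char) (d0 : Nat), cs.toList = [c] →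
      (∀ d, d < 10 → (Nat.digitChar d = c ↔ d = d0)) →
      (PySem.Str.isIn cs (PySem.Int.toStr (n : Int)) = true ↔ d0 ∈ Nat.digits 10 n) := by
    intro cs c d0 hcl hc
    rw [PySem.Str.isIn_eq, hts, hcl, pv_isIn_singleton]
    exact pv_mem_toDigits hc h
  have h2 := key "2" '2' 2 rfl (by decide)
  have h3 := key "3" '3' 3 rfl (by decide)
  have h4 := key "4" '4' 4 rfl (by decide)
  have h5 := key "5" '5' 5 rfl (by decide)
  have h6 := key "6" '6' 6 rfl (by decide)
  have h7 := key "7" '7' 7 rfl (by decide)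
  have h9 := key "9" '9' 9 rfl (by decide)
  have hA7 := pv_allInB_iff pvS7 n
  have hA3 := pv_allInB_iff pvS3 n
  have hlt : ∀ d ∈ Nat.digits 10 n, d < 10 := fun d hd => Nat.digits_lt_base (by norm_num) hd
  have fact1 : ∀ d : Nat, d < 10 → ((d : Int) ∈ pvS7 ↔ ¬(d = 3 ∨ d = 4 ∨ d = 7)) := by decide
  have fact2 : ∀ d : Nat, d < 10 → (¬(d = 3 ∨ d = 4 ∨ d = 7) → ((d : Int) ∉ pvS3 ↔ (d = 2 ∨ d = 5 ∨ d = 6 ∨ d = 9))) := by decide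
  have fact3 : ∀ d : Nat, d < 10 → ((d : Int) ∈ pvS3 → (d : Int) ∈ pvS7) := by decide
  have hgood : goodA (PySem.Int.toStr (n : Int)) = true ↔
      ((∀ d ∈ Nat.digits 10 n, (d : Int) ∈ pvS7) ∧ ¬(∀ d ∈ Nat.digits 10 n, (d : Int) ∈ pvS3)) := by
    rw [goodA]
    split_ifs with hcond
    · simp only [false_iff]
      rintro ⟨hA7', -⟩
      rcases Bool.or_eq_true_iff.mp hcond with hor | hb7
      · rcases Bool.or_eq_true_iff.mp hor with hb3 | hb4
        · exact absurd (hA7' 3 (h3.mp hb3)) (by decide)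
        · exact absurd (hA7' 4 (h4.mp hb4)) (by decide)
      · exact absurd (hA7' 7 (h7.mp hb7)) (by decide)
    · have hno : 3 ∉ Nat.digits 10 n ∧ 4 ∉ Nat.digits 10 n ∧ 7 ∉ Nat.digits 10 n := by
        refine ⟨fun hm => hcond ?_, fun hm => hcond ?_, fun hm => hcond ?_⟩
        · rw [Bool.or_eq_true_iff, Bool.or_eq_true_iff]; exact Or.inl (Or.inl (h3.mpr hm))
        · rw [Bool.or_eq_true_iff, Bool.or_eq_true_iff]; exact Or.inl (Or.inr (h4.mpr hm))
        · rw [Bool.or_eq_true_iff]; exact Or.inr (h7.mpr hm)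
      have hA7holds : ∀ d ∈ Nat.digits 10 n, (d : Int) ∈ pvS7 := by
        intro d hd
        refine (fact1 d (hlt d hd)).mpr ?_
        rintro (rfl | rfl | rfl)
        · exact hno.1 hd
        · exact hno.2.1 hd
        · exact hno.2.2 hd
      constructor
      · intro hb
        refine ⟨hA7holds, fun hall => ?_⟩
        have : 2 ∈ Nat.digits 10 n ∨ 5 ∈ Nat.digits 10 n ∨ 6 ∈ Nat.digits 10 n ∨ 9 ∈ Nat.digits 10 n := by
          rcases Bool.or_eq_true_iff.mp hb with hor | hb9
          · rcases Bool.or_eq_true_iff.mp hor with hor2 | hb6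
            · rcases Bool.or_eq_true_iff.mp hor2 with hb2 | hb5
              · exact Or.inl (h2.mp hb2)
              · exact Or.inr (Or.inl (h5.mp hb5))
            · exact Or.inr (Or.inr (Or.inl (h6.mp hb6)))
          · exact Or.inr (Or.inr (Or.inr (h9.mp hb9)))
        rcases this with hd | hd | hd | hd <;> exact absurd (hall _ hd) (by decide)
      · rintro ⟨-, hnall⟩
        have hex : ∃ d ∈ Nat.digits 10 n, (d : Int) ∉ pvS3 := by
          by_contra hne
          exact hnall fun d hd => by_contra fun hc2 => hne ⟨d, hd, hc2⟩
        obtain ⟨d, hd, hdn⟩ := hex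
        have hd10 := hlt d hd
        have hd347 : ¬(d = 3 ∨ d = 4 ∨ d = 7) := by
          rintro (rfl | rfl | rfl)
          · exact hno.1 hd
          · exact hno.2.1 hd
          · exact hno.2.2 hd
        rcases (fact2 d hd10 hd347).mp hdn with rfl | rfl | rfl | rfl
        · rw [Bool.or_eq_true_iff, Bool.or_eq_true_iff, Bool.or_eq_true_iff]
          exact Or.inl (Or.inl (Or.inl (h2.mpr hd)))
        · rw [Bool.or_eq_true_iff, Bool.or_eq_true_iff, Bool.or_eq_true_iff]
          exact Or.inl (Or.inl (Or.inr (h5.mpr hd)))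
        · rw [Bool.or_eq_true_iff, Bool.or_eq_true_iff]
          exact Or.inl (Or.inr (h6.mpr hd))
        · rw [Bool.or_eq_true_iff]
          exact Or.inr (h9.mpr hd)
  by_cases g7 : ∀ d ∈ Nat.digits 10 n, (d : Int) ∈ pvS7
  · by_cases g3 : ∀ d ∈ Nat.digits 10 n, (d : Int) ∈ pvS3
    · have hb7 : allInB (n : Int) pvS7 = true := hA7.mpr g7
      have hb3 : allInB (n : Int) pvS3 = true := hA3.mpr g3
      have hg : goodA (PySem.Int.toStr (n : Int)) = false := by
        rcases Bool.eq_false_or_eq_true (goodA (PySem.Int.toStr (n : Int))) with ht | hf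
        · exact absurd g3 (hgood.mp ht).2
        · exact hf
      rw [hg, hb7, hb3]; norm_num
    · have hb7 : allInB (n : Int) pvS7 = true := hA7.mpr g7
      have hb3 : allInB (n : Int) pvS3 = false := by
        rcases Bool.eq_false_or_eq_true (allInB (n : Int) pvS3) with ht | hf
        · exact absurd (hA3.mp ht) g3
        · exact hf
      have hg : goodA (PySem.Int.toStr (n : Int)) = true := hgood.mpr ⟨g7, g3⟩
      rw [hg, hb7, hb3]; norm_num
  · have g3 : ¬ ∀ d ∈ Nat.digits 10 n, (d : Int) ∈ pvS3 :=
      fun hall => g7 fun d hd => fact3 d (hlt d hd) (hall d hd)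
    have hb7 : allInB (n : Int) pvS7 = false := by
      rcases Bool.eq_false_or_eq_true (allInB (n : Int) pvS7) with ht | hf
      · exact absurd (hA7.mp ht) g7
      · exact hf
    have hb3 : allInB (n : Int) pvS3 = false := by
      rcases Bool.eq_false_or_eq_true (allInB (n : Int) pvS3) with ht | hf
      · exact absurd (hA3.mp ht) g3
      · exact hf
    have hg : goodA (PySem.Int.toStr (n : Int)) = false := by
      rcases Bool.eq_false_or_eq_true (goodA (PySem.Int.toStr (n : Int))) with ht | hf
      · exact absurd (hgood.mp ht).1 g7
      · exact hf
    rw [hg, hb7, hb3]; norm_num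

-- arithmetic/unfolding helper lemmas for the B-side recursion
lemma pv_hmod : ∀ a : Int, PySem.Int.mod a 10 = a % 10 := fun _ => PySem.Int.mod_eq_emod_of_pos (by norm_num)

lemma pv_hdiv : ∀ a : Int, PySem.Int.floordiv a 10 = a / 10 := fun _ => PySem.Int.floordiv_eq_ediv_of_pos (by norm_num)

lemma pv_countLEB_else (n : Int) (S : List Int) (hn : ¬ n ≤ 0) (hq : ¬ n / 10 = 0) :
    countLEB n S = (countLEB (n / 10 - 1) S + 1) * (S.length : Int) - 1 +
      (if allInB (n / 10) S then ((S.countP (fun d => decide (d ≤ n % 10)) : Nat) : Int) else 0) := by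
  rw [countLEB]
  simp only [pv_hmod, pv_hdiv, if_neg hn, if_neg hq]

lemma pv_allInB_pos (n : Int) (S : List Int) (hn : ¬ n ≤ 0) :
    allInB n S = if n % 10 ∈ S then allInB (n / 10) S else false := by
  rw [allInB]
  simp only [pv_hmod, pv_hdiv, if_neg hn]

-- the digit-DP satisfies the brute-force recurrence
lemma pv_countLEB_step (S : List Int) (hS : S = pvS7 ∨ S = pvS3) : ∀ (n : Int), 1 ≤ n →
    countLEB n S = countLEB (n - 1) S + (if allInB n S then 1 else 0) := by
  have main : ∀ (m : Nat) (n : Int), n.toNat = m → 1 ≤ n →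
      countLEB n S = countLEB (n - 1) S + (if allInB n S then 1 else 0) := by
    intro m
    induction m using Nat.strong_induction_on with
    | _ m ih =>
      intro n hm h1
      by_cases hq0 : n / 10 = 0
      · -- 1 ≤ n ≤ 9 : all concrete
        have hn9 : n ≤ 9 := by omega
        interval_cases n <;>
          rcases hS with rfl | rfl <;>
            simp [countLEB, allInB, pvS7, pvS3]
      · have hq1 : 1 ≤ n / 10 := by omega
        have hn10 : 10 ≤ n := by omega
        rw [pv_allInB_pos n S (by omega)]
        by_cases hr : n % 10 = 0
        · -- n = 10 * q
          have hq' : (n - 1) / 10 = n / 10 - 1 := by omega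
          have hr' : (n - 1) % 10 = 9 := by omega
          rw [pv_countLEB_else n S (by omega) hq0]
          by_cases hq2 : n / 10 = 1
          · -- n = 10, everything concrete
            have hn : n = 10 := by omega
            subst hn
            rcases hS with rfl | rfl <;>
              norm_num <;>
                simp [countLEB, allInB, pvS7, pvS3]
          · -- q ≥ 2
            rw [pv_countLEB_else (n - 1) S (by omega) (by omega), hq', hr']
            have hih := ih (n / 10 - 1).toNat (by omega) (n / 10 - 1) rfl (by omega)
            rw [pv_allInB_pos (n / 10) S (by omega)] at *
            have hc0 : ((S.countP (fun d => decide (d ≤ (0 : Int))) : Nat) : Int) = 1 := by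
              rcases hS with rfl | rfl <;> decide
            have hc9 : ((S.countP (fun d => decide (d ≤ 9)) : Nat) : Int) = (S.length : Int) := by
              rcases hS with rfl | rfl <;> decide
            have h0S : (0 : Int) ∈ S := by rcases hS with rfl | rfl <;> decide
            rw [hr, if_pos h0S, hc0, hc9, hih]
            by_cases hb1 : allInB (n / 10 - 1) S = true <;>
              by_cases hb2 : (if (n / 10) % 10 ∈ S then allInB (n / 10 / 10) S else false) = true <;>
                simp [hb1, hb2] <;> ring
        · -- r ≥ 1 : same q
          have hq' : (n - 1) / 10 = n / 10 := by omega
          have hr' : (n - 1) % 10 = n % 10 - 1 := by omega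
          rw [pv_countLEB_else n S (by omega) hq0, pv_countLEB_else (n - 1) S (by omega) (by omega), hq', hr']
          have hcnt : ((S.countP (fun d => decide (d ≤ n % 10)) : Nat) : Int) =
              ((S.countP (fun d => decide (d ≤ n % 10 - 1)) : Nat) : Int) +
                (if (n % 10) ∈ S then 1 else 0) := by
            have h10 : n % 10 ≤ 9 := by omega
            have h11 : 1 ≤ n % 10 := by omega
            set r := n % 10 with hrdef
            interval_cases r <;> rcases hS with rfl | rfl <;> decide
          rw [hcnt]
          by_cases hb1 : allInB (n / 10) S = true <;> by_cases hb2 : (n % 10) ∈ S <;>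
            simp [hb1, hb2] <;> try ring
  exact fun n h1 => main n.toNat n rfl h1

lemma pv_main (n : Nat) :
    rotatedDigits (n : Int) = countLEB (n : Int) pvS7 - countLEB (n : Int) pvS3 := by
  induction n with
  | zero =>
    rw [rotatedDigits, PySem.List.pyRange_one_eq_nil (by norm_num)]
    rw [countLEB, countLEB]
    norm_num
  | succ n ih =>
    have hcast : ((n + 1 : Nat) : Int) = (n : Int) + 1 := by push_cast; ring
    have hsplit : rotatedDigits ((n + 1 : Nat) : Int) =
        (if goodA (PySem.Int.toStr ((n : Int) + 1)) then rotatedDigits (n : Int) + 1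
         else rotatedDigits (n : Int)) := by
      unfold rotatedDigits
      rw [hcast, PySem.List.pyRange_one_succ_right (by omega), List.foldl_append]
      simp only [List.foldl_cons, List.foldl_nil]
    have hg := pv_good_eq (n + 1) (by omega)
    rw [hcast] at hg
    have hs7 := pv_countLEB_step pvS7 (Or.inl rfl) ((n : Int) + 1) (by omega)
    have hs3 := pv_countLEB_step pvS3 (Or.inr rfl) ((n : Int) + 1) (by omega)
    have hsub : ((n : Int) + 1) - 1 = (n : Int) := by ring
    rw [hsub] at hs7 hs3
    rw [hcast] at hsplit
    rw [hcast, hsplit, hs7, hs3, ih]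
    by_cases hb : goodA (PySem.Int.toStr ((n : Int) + 1)) = true <;>
      by_cases h7 : allInB ((n : Int) + 1) pvS7 = true <;>
        by_cases h3 : allInB ((n : Int) + 1) pvS3 = true <;>
          simp only [hb, h7, h3, if_true, if_false, Bool.false_eq_true] at hg ⊢ <;>
            omega

-- ===== VERDICT (by name: the statement is the Claim_ definition above) =====
theorem rotatedDigits_spec : Claim_equal_rotatedDigits := by
  intro N _
  unfold Spec_rotatedDigits rotatedDigits_alt
  by_cases hN : N ≤ 0
  · rw [rotatedDigits, PySem.List.pyRange_one_eq_nil (by omega)]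
    rw [countLEB, countLEB]
    simp [hN]
  · have h := pv_main N.toNat
    rwa [Int.toNat_of_nonneg (by omega)] at h
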